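-- pv_equiv track=rewrite | github.com/IyatomiLab/CCI | cci/output_formatter.py | _order_columns
-- ===== SOURCE A (Python) =====
-- from typing import Any, Dict, List
--
-- BASE_ORDER = ["text", "model_id", "target_culture", "cci"]
--
-- PREFIX_ORDER = ["p_", "p_error"]
--
-- def _order_columns(keys: List[str]) -> List[str]:
--     """Build deterministic header order: base keys -> prefixed groups -> remaining keys."""
--     seen: set[str] = set()
--     ordered: List[str] = []
--
--     for key in BASE_ORDER:
--         if key in keys and key not in seen:
--             ordered.append(key)
--             seen.add(key)
--
--     sorted_keys = sorted(keys)
--     for prefix in PREFIX_ORDER: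
--         for key in sorted_keys:
--             if key not in seen and (key == prefix or key.startswith(prefix)):
--                 ordered.append(key)
--                 seen.add(key)
--
--     for key in sorted_keys:
--         if key not in seen:
--             ordered.append(key)
--             seen.add(key)
--
--     return ordered
-- ===== SOURCE B (Python) =====
-- from typing import List
--
-- BASE_ORDER = ["text", "model_id", "target_culture", "cci"]
--
-- PREFIX_ORDER = ["p_", "p_error"]
--
-- def _order_columns(keys: List[str]) -> List[str]:
--     """Single sorted() over the unique keys with a composite rank key."""
--     def rank(key: str):
--         if key in BASE_ORDER:
--             return (BASE_ORDER.index(key), key)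
--         if any(key == p or key.startswith(p) for p in PREFIX_ORDER):
--             return (len(BASE_ORDER), key)
--         return (len(BASE_ORDER) + 1, key)
--     return sorted(set(keys), key=rank)
-- ===== Notes on version B (the rewrite author's own statement) =====
-- stated objective: idiomatic
-- what changed: Replaced A's three sequential filtering passes over BASE_ORDER/sorted(keys) with a mutable seen-set by a single sorted(set(keys), key=rank) call using a composite (group-rank, key) sort key.
import Mathlib
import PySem

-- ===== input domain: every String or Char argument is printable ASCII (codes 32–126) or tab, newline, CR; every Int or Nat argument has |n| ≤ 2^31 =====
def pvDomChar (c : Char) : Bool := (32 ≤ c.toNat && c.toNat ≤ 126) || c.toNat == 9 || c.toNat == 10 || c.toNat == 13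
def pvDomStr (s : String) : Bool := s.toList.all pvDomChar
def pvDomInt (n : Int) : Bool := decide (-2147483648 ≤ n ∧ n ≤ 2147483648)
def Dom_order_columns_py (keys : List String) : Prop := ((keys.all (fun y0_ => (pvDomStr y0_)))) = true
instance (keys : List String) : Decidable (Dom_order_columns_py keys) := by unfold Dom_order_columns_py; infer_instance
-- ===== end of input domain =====

-- B replaces A's three sequential filtering passes plus a seen-set with one sorted() over the
-- unique keys under a composite rank key (objective: idiomatic/alternative; same return value).

-- ===== PORT A =====
def pvBaseOrder : List String := ["text", "model_id", "target_culture", "cci"]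

def pvPrefixOrder : List String := ["p_", "p_error"]

-- one Python for-loop of A: append `key` and mark it seen when `cond key seen` holds
def pvPass (cond : String → PySem.Set String → Bool) (xs : List String)
    (st : PySem.Set String × List String) : PySem.Set String × List String :=
  xs.foldl (fun st key => if cond key st.1 then (PySem.Set.add st.1 key, st.2 ++ [key]) else st) st

def order_columns_py (keys : List String) : List String :=
  let st1 := pvPass (fun key seen => keys.contains key && !(PySem.Set.contains seen key))
      pvBaseOrder (PySem.Set.empty, [])
  let sortedKeys := PySem.List.sorted keys (fun k => k)
  let st2 := pvPrefixOrder.foldl (fun st pfx =>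
      pvPass (fun key seen => !(PySem.Set.contains seen key) &&
        (key == pfx || PySem.Str.startswith key pfx)) sortedKeys st) st1
  let st3 := pvPass (fun key seen => !(PySem.Set.contains seen key)) sortedKeys st2
  st3.2

-- ===== PORT B =====
-- rank(key) of Source B; the Python 2-tuple compares lexicographically, hence Lex (Int × String)
def pvRank (key : String) : Lex (Int × String) :=
  if pvBaseOrder.contains key then
    -- BASE_ORDER.index(key): guarded by the membership test, so the `.getD 0` default is never used
    toLex ((((PySem.List.index? pvBaseOrder key).getD 0 : Nat) : Int), key)
  else if pvPrefixOrder.any (fun p => key == p || PySem.Str.startswith key p) then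
    toLex ((pvBaseOrder.length : Int), key)
  else
    toLex ((pvBaseOrder.length : Int) + 1, key)

def order_columns_py_alt (keys : List String) : List String :=
  PySem.List.sorted (PySem.Set.ofList keys) pvRank

-- ===== PRECONDITION & SPEC =====
def Spec_order_columns_py (keys : List String) (out : List String) : Prop := out = order_columns_py_alt keys
instance (keys : List String) (out : List String) : Decidable (Spec_order_columns_py keys out) := by unfold Spec_order_columns_py; infer_instance

-- ===== CLAIM (what is proved, stated in full; the proofs are below) =====
def Claim_equal_order_columns_py : Prop := ∀ (keys : List String), Dom_order_columns_py keys → Spec_order_columns_py keys (order_columns_py keys)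

-- ===== LEMMAS AND PROOFS =====

-- the list of keys a `pvPass` loop appends, recursively on the scanned list
def pvPick (seen : List String) (p : String → Bool) : List String → List String
  | [] => []
  | x :: xs => if p x && !(seen.contains x) then x :: pvPick (seen ++ [x]) p xs else pvPick seen p xs

lemma pvPass_eq (cond : String → PySem.Set String → Bool) (p : String → Bool)
    (hc : ∀ k s, cond k s = (p k && !(PySem.Set.contains s k))) :
    ∀ (xs seen acc : List String),
      pvPass cond xs (seen, acc) = (seen ++ pvPick seen p xs, acc ++ pvPick seen p xs) := by
  intro xs
  induction xs with
  | nil => intro seen acc; simp [pvPass, pvPick]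
  | cons x xs ih =>
    intro seen acc
    have hstep : pvPass cond (x :: xs) (seen, acc)
        = pvPass cond xs (if cond x seen then (PySem.Set.add seen x, acc ++ [x]) else (seen, acc)) := by
      simp only [pvPass, List.foldl_cons]
    rw [hstep, hc]
    by_cases hpx : p x = true
    · by_cases hs : x ∈ seen
      · have : PySem.Set.contains seen x = true := by simp [PySem.Set.contains, hs]
        simp [this, hpx, pvPick, PySem.Set.contains, hs, ih]
      · have hcf : PySem.Set.contains seen x = false := by simp [PySem.Set.contains, hs]
        have hadd : PySem.Set.add seen x = seen ++ [x] := by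
          simp [PySem.Set.add, PySem.Set.contains, hs]
        simp only [hcf, hpx, Bool.not_false, Bool.and_true, if_true, hadd]
        rw [ih]
        simp [pvPick, hpx, hs]
    · have : p x = false := by simpa using hpx
      simp [this, pvPick, ih]

lemma mem_pvPick (p : String → Bool) :
    ∀ (xs seen : List String) (x : String),
      x ∈ pvPick seen p xs ↔ x ∈ xs ∧ p x = true ∧ x ∉ seen := by
  intro xs
  induction xs with
  | nil => intro seen x; simp [pvPick]
  | cons y ys ih =>
    intro seen x
    by_cases hpy : p y = true
    · by_cases hs : y ∈ seen
      · have hunf : pvPick seen p (y :: ys) = pvPick seen p ys := by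
          simp [pvPick, hpy, hs]
        rw [hunf, ih, List.mem_cons]
        constructor
        · rintro ⟨h1, h2, h3⟩; exact ⟨Or.inr h1, h2, h3⟩
        · rintro ⟨h1, h2, h3⟩
          rcases h1 with rfl | h1
          · exact absurd hs h3
          · exact ⟨h1, h2, h3⟩
      · have hunf : pvPick seen p (y :: ys) = y :: pvPick (seen ++ [y]) p ys := by
          simp [pvPick, hpy, hs]
        rw [hunf, List.mem_cons, ih, List.mem_cons]
        constructor
        · rintro (rfl | ⟨h1, h2, h3⟩)
          · exact ⟨Or.inl rfl, hpy, hs⟩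
          · refine ⟨Or.inr h1, h2, fun hm => h3 (by simp [hm])⟩
        · rintro ⟨h1, h2, h3⟩
          by_cases hxy : x = y
          · exact Or.inl hxy
          · rcases h1 with rfl | h1
            · exact absurd rfl hxy
            · refine Or.inr ⟨h1, h2, fun hm => ?_⟩
              rcases List.mem_append.mp hm with h | h
              · exact h3 h
              · exact hxy (by simpa using h)
    · have hpy' : p y = false := by simpa using hpy
      have hunf : pvPick seen p (y :: ys) = pvPick seen p ys := by
        simp [pvPick, hpy']
      rw [hunf, ih, List.mem_cons]
      constructor
      · rintro ⟨h1, h2, h3⟩; exact ⟨Or.inr h1, h2, h3⟩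
      · rintro ⟨h1, h2, h3⟩
        rcases h1 with rfl | h1
        · rw [hpy'] at h2; exact absurd h2 (by simp)
        · exact ⟨h1, h2, h3⟩

lemma nodup_pvPick (p : String → Bool) : ∀ (xs seen : List String), (pvPick seen p xs).Nodup := by
  intro xs
  induction xs with
  | nil => intro seen; simp [pvPick]
  | cons y ys ih =>
    intro seen
    by_cases h : (p y && !(seen.contains y)) = true
    · simp only [pvPick, h, if_true]
      refine List.nodup_cons.mpr ⟨fun hmem => ?_, ih _⟩
      have := (mem_pvPick p ys (seen ++ [y]) y).mp hmem
      exact this.2.2 (by simp)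
    · simp only [pvPick, h, if_false]; exact ih _

lemma sublist_pvPick (p : String → Bool) : ∀ (xs seen : List String), (pvPick seen p xs).Sublist xs := by
  intro xs
  induction xs with
  | nil => intro seen; simp [pvPick]
  | cons y ys ih =>
    intro seen
    by_cases h : (p y && !(seen.contains y)) = true
    · simp only [pvPick, h, if_true]; exact List.Sublist.cons₂ _ (ih _)
    · simp only [pvPick, h, if_false]; exact List.Sublist.cons _ (ih _)

lemma pvPick_nil (p : String → Bool) :
    ∀ (xs seen : List String), (∀ x ∈ xs, p x = true → x ∈ seen) → pvPick seen p xs = [] := by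
  intro xs
  induction xs with
  | nil => intro seen _; simp [pvPick]
  | cons y ys ih =>
    intro seen h
    have hcond : (p y && !(seen.contains y)) = false := by
      by_cases hpy : p y = true
      · have := h y (List.mem_cons_self) hpy
        simp [hpy, this]
      · simp [show p y = false by simpa using hpy]
    simp only [pvPick, hcond, if_false]
    exact ih seen (fun x hx => h x (List.mem_cons_of_mem _ hx))

-- abbreviations for the three groups A produces
def pvP (k : String) : Bool := k == "p_" || PySem.Str.startswith k "p_"

def pvS (keys : List String) : List String := PySem.List.sorted keys (fun k => k)

def pvL1 (keys : List String) : List String := pvPick [] (fun k => keys.contains k) pvBaseOrder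

def pvL2 (keys : List String) : List String := pvPick (pvL1 keys) pvP (pvS keys)

def pvL3 (keys : List String) : List String :=
  pvPick (pvL1 keys ++ pvL2 keys) (fun _ => true) (pvS keys)

lemma sw_p_of_sw_perror (k : String) (h : PySem.Str.startswith k "p_error" = true) :
    PySem.Str.startswith k "p_" = true := by
  rw [PySem.Str.startswith_eq] at h ⊢
  rw [PySem.Chars.startswith_iff] at h ⊢
  exact List.IsPrefix.trans (by decide) h

lemma base_not_p : ∀ b ∈ pvBaseOrder, pvP b = false := by decide

lemma pvP_of_perror (k : String) (h : (k == "p_error" || PySem.Str.startswith k "p_error") = true) :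
    pvP k = true := by
  rcases Bool.or_eq_true_iff.mp h with h | h
  · have : k = "p_error" := by simpa using h
    subst this; decide
  · have h' := sw_p_of_sw_perror k h
    simp only [pvP, Bool.or_eq_true]
    right
    simpa using h'

lemma L1_subset_base (keys : List String) : pvL1 keys ⊆ pvBaseOrder :=
  (sublist_pvPick _ pvBaseOrder []).subset

lemma mem_L1 (keys : List String) (x : String) :
    x ∈ pvL1 keys ↔ x ∈ pvBaseOrder ∧ x ∈ keys := by
  rw [pvL1, mem_pvPick]
  simp

lemma mem_L2 (keys : List String) (x : String) (hx : x ∈ pvL2 keys) :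
    x ∉ pvBaseOrder ∧ pvP x = true ∧ x ∈ pvS keys ∧ x ∉ pvL1 keys := by
  obtain ⟨hS, hp, hL1⟩ := (mem_pvPick pvP (pvS keys) (pvL1 keys) x).mp hx
  refine ⟨fun hb => ?_, hp, hS, hL1⟩
  rw [base_not_p x hb] at hp; exact absurd hp (by simp)

lemma mem_L3 (keys : List String) (x : String) (hx : x ∈ pvL3 keys) :
    x ∉ pvBaseOrder ∧ pvP x = false ∧ x ∈ pvS keys ∧ x ∉ pvL1 keys ++ pvL2 keys := by
  obtain ⟨hS, -, h12⟩ := (mem_pvPick (fun _ => true) (pvS keys) (pvL1 keys ++ pvL2 keys) x).mp hx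
  have hkeys : x ∈ keys := (PySem.List.mem_sorted keys (fun k => k) false x).mp hS
  have hnb : x ∉ pvBaseOrder := by
    intro hb
    exact h12 (List.mem_append_left _ ((mem_L1 keys x).mpr ⟨hb, hkeys⟩))
  refine ⟨hnb, ?_, hS, h12⟩
  by_contra hp
  have hp : pvP x = true := by simpa using hp
  have : x ∈ pvL2 keys := (mem_pvPick pvP (pvS keys) (pvL1 keys) x).mpr
    ⟨hS, hp, fun h1 => h12 (List.mem_append_left _ h1)⟩
  exact h12 (List.mem_append_right _ this)

lemma A_char (keys : List String) :
    order_columns_py keys = pvL1 keys ++ pvL2 keys ++ pvL3 keys := by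
  have h1 := pvPass_eq (fun key seen => keys.contains key && !(PySem.Set.contains seen key))
    (fun k => keys.contains k) (fun _ _ => rfl) pvBaseOrder [] []
  have h2 := pvPass_eq (fun key seen => !(PySem.Set.contains seen key) &&
      (key == "p_" || PySem.Str.startswith key "p_")) pvP
    (fun k s => by simp [pvP, Bool.and_comm]) (pvS keys) (pvL1 keys) (pvL1 keys)
  have hz : pvPick (pvL1 keys ++ pvL2 keys)
      (fun k => k == "p_error" || PySem.Str.startswith k "p_error") (pvS keys) = [] := by
    apply pvPick_nil
    intro x hxS hperr
    have hp := pvP_of_perror x hperr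
    have hL1 : x ∉ pvL1 keys := fun h1 => by
      rw [base_not_p x (L1_subset_base keys h1)] at hp; exact absurd hp (by simp)
    exact List.mem_append_right _
      ((mem_pvPick pvP (pvS keys) (pvL1 keys) x).mpr ⟨hxS, hp, hL1⟩)
  have h2' := pvPass_eq (fun key seen => !(PySem.Set.contains seen key) &&
      (key == "p_error" || PySem.Str.startswith key "p_error"))
    (fun k => k == "p_error" || PySem.Str.startswith k "p_error")
    (fun k s => by simp [Bool.and_comm]) (pvS keys) (pvL1 keys ++ pvL2 keys) (pvL1 keys ++ pvL2 keys)
  have h3 := pvPass_eq (fun key seen => !(PySem.Set.contains seen key)) (fun _ => true)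
    (fun k s => by simp) (pvS keys) (pvL1 keys ++ pvL2 keys) (pvL1 keys ++ pvL2 keys)
  simp only [order_columns_py, pvPrefixOrder, List.foldl_cons, List.foldl_nil]
  rw [show (PySem.Set.empty : PySem.Set String) = ([] : List String) from rfl]
  rw [h1]
  simp only [List.nil_append]
  rw [show PySem.List.sorted keys (fun k => k) = pvS keys from rfl,
      show pvPick [] (fun k => keys.contains k) pvBaseOrder = pvL1 keys from rfl]
  rw [h2]
  rw [show pvPick (pvL1 keys) pvP (pvS keys) = pvL2 keys from rfl]
  rw [h2', hz]
  simp only [List.append_nil]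
  rw [h3]
  rfl

lemma pvLex_lt_of_fst_lt {x y : Lex (Int × String)} (h : (ofLex x).1 < (ofLex y).1) : x < y := by
  rw [← toLex_ofLex x, ← toLex_ofLex y]
  exact Prod.Lex.toLex_lt_toLex.mpr (Or.inl h)

lemma rank_base_fst_lt : ∀ a ∈ pvBaseOrder, (ofLex (pvRank a)).1 < 4 := by decide

lemma rank_base_pairwise : List.Pairwise (fun a b => pvRank a < pvRank b) pvBaseOrder := by
  have h : List.Pairwise (fun a b => (ofLex (pvRank a)).1 < (ofLex (pvRank b)).1) pvBaseOrder := by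
    decide
  exact h.imp pvLex_lt_of_fst_lt

lemma rank_p (k : String) (hb : k ∉ pvBaseOrder) (hp : pvP k = true) :
    pvRank k = toLex (4, k) := by
  have hcont : pvBaseOrder.contains k = false := by simp [hb]
  have hp' : (k == "p_" || PySem.Str.startswith k "p_") = true := hp
  have hany : pvPrefixOrder.any (fun p => k == p || PySem.Str.startswith k p) = true := by
    simp only [pvPrefixOrder, List.any_cons, hp', Bool.true_or]
  rw [pvRank, if_neg (by simp [hb]), if_pos hany]
  norm_num [pvBaseOrder]

lemma rank_rest (k : String) (hb : k ∉ pvBaseOrder) (hp : pvP k = false) :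
    pvRank k = toLex (5, k) := by
  have hcont : pvBaseOrder.contains k = false := by simp [hb]
  have h1 : (k == "p_" || PySem.Str.startswith k "p_") = false := hp
  have h2 : (k == "p_error" || PySem.Str.startswith k "p_error") = false := by
    by_contra h
    have h' : (k == "p_error" || PySem.Str.startswith k "p_error") = true := by
      revert h; cases (k == "p_error" || PySem.Str.startswith k "p_error") <;> simp
    rw [pvP_of_perror k h'] at hp; exact absurd hp (by simp)
  have hany : pvPrefixOrder.any (fun p => k == p || PySem.Str.startswith k p) = false := by
    simp only [pvPrefixOrder, List.any_cons, List.any_nil, h1, h2, Bool.or_self, Bool.or_false]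
  rw [pvRank, if_neg (by simp [hb]), if_neg (by rw [Bool.not_eq_true]; exact hany)]
  norm_num [pvBaseOrder]

lemma rank_fst_L2 (keys : List String) (x : String) (hx : x ∈ pvL2 keys) :
    pvRank x = toLex (4, x) := by
  obtain ⟨hnb, hp, -, -⟩ := mem_L2 keys x hx
  exact rank_p x hnb hp

lemma rank_fst_L3 (keys : List String) (x : String) (hx : x ∈ pvL3 keys) :
    pvRank x = toLex (5, x) := by
  obtain ⟨hnb, hp, -, -⟩ := mem_L3 keys x hx
  exact rank_rest x hnb hp

lemma pairwise_lt_of_pick_sorted (keys : List String) (seen : List String) (p : String → Bool) :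
    List.Pairwise (fun a b : String => a < b) (pvPick seen p (pvS keys)) := by
  have hle : List.Pairwise (fun a b : String => a ≤ b) (pvPick seen p (pvS keys)) :=
    List.Pairwise.sublist (sublist_pvPick p (pvS keys) seen)
      (PySem.List.sorted_pairwise keys (fun k => k))
  have hnd : List.Pairwise (fun a b : String => a ≠ b) (pvPick seen p (pvS keys)) :=
    nodup_pvPick p (pvS keys) seen
  exact (hle.and hnd).imp (fun h => lt_of_le_of_ne h.1 h.2)

-- ===== VERDICT (by name: the statement is the Claim_ definition above) =====
theorem order_columns_py_spec : Claim_equal_order_columns_py := by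
  intro keys _
  unfold Spec_order_columns_py order_columns_py_alt
  rw [A_char]
  symm
  apply PySem.List.sorted_eq_of_perm_of_pairwise_lt
  · -- permutation
    have nd1 : (pvL1 keys).Nodup := nodup_pvPick _ _ _
    have nd2 : (pvL2 keys).Nodup := nodup_pvPick _ _ _
    have nd3 : (pvL3 keys).Nodup := nodup_pvPick _ _ _
    have nd12 : (pvL1 keys ++ pvL2 keys).Nodup := by
      rw [List.nodup_append]
      exact ⟨nd1, nd2, by intro a ha b hb; rintro rfl; exact (mem_L2 keys a hb).2.2.2 ha⟩
    have nd : (pvL1 keys ++ pvL2 keys ++ pvL3 keys).Nodup := by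
      rw [List.nodup_append]
      exact ⟨nd12, nd3, by intro a ha b hb; rintro rfl; exact (mem_L3 keys a hb).2.2.2 ha⟩
    rw [List.perm_ext_iff_of_nodup nd (PySem.Set.nodup_ofList keys)]
    intro a
    rw [PySem.Set.mem_ofList]
    constructor
    · intro h
      rcases List.mem_append.mp h with h | h3
      · rcases List.mem_append.mp h with h1 | h2
        · exact ((mem_L1 keys a).mp h1).2
        · exact (PySem.List.mem_sorted keys (fun k => k) false a).mp (mem_L2 keys a h2).2.2.1
      · exact (PySem.List.mem_sorted keys (fun k => k) false a).mp (mem_L3 keys a h3).2.2.1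
    · intro ha
      by_cases h12 : a ∈ pvL1 keys ++ pvL2 keys
      · exact List.mem_append_left _ h12
      · refine List.mem_append_right _ ?_
        exact (mem_pvPick (fun _ => true) (pvS keys) (pvL1 keys ++ pvL2 keys) a).mpr
          ⟨(PySem.List.mem_sorted keys (fun k => k) false a).mpr ha, rfl, h12⟩
  · -- pairwise strictly increasing rank
    rw [List.pairwise_append]
    refine ⟨?_, ?_, ?_⟩
    · rw [List.pairwise_append]
      refine ⟨?_, ?_, ?_⟩
      · exact List.Pairwise.sublist (sublist_pvPick _ pvBaseOrder []) rank_base_pairwise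
      · refine (pairwise_lt_of_pick_sorted keys _ _).imp_of_mem ?_
        intro a b ha hb hab
        rw [rank_fst_L2 keys a ha, rank_fst_L2 keys b hb]
        exact Prod.Lex.toLex_lt_toLex.mpr (Or.inr ⟨rfl, hab⟩)
      · intro a ha b hb
        apply pvLex_lt_of_fst_lt
        rw [rank_fst_L2 keys b hb]
        have h4 : (ofLex (toLex ((4 : Int), b))).1 = 4 := rfl
        rw [h4]
        exact rank_base_fst_lt a (L1_subset_base keys ha)
    · refine (pairwise_lt_of_pick_sorted keys _ _).imp_of_mem ?_
      intro a b ha hb hab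
      rw [rank_fst_L3 keys a ha, rank_fst_L3 keys b hb]
      exact Prod.Lex.toLex_lt_toLex.mpr (Or.inr ⟨rfl, hab⟩)
    · intro a ha b hb
      apply pvLex_lt_of_fst_lt
      rw [rank_fst_L3 keys b hb]
      have h5 : (ofLex (toLex ((5 : Int), b))).1 = 5 := rfl
      rw [h5]
      rcases List.mem_append.mp ha with h1 | h2
      · exact lt_trans (rank_base_fst_lt a (L1_subset_base keys h1)) (by norm_num)
      · rw [rank_fst_L2 keys a h2]; norm_num
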